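-- pv_equiv track=rewrite | github.com/xingjiepan/simple_biophysics_models | conversion/unit_conversion.py | split_unit_string_to_positive_and_negative_lists
-- ===== SOURCE A (Python) =====
-- def split_unit_string_to_positive_and_negative_lists(unit_string):
--     '''Split a unit string to a list of positive and
--     negative units.
--     '''
--     # Add padding to the unit_string
--
--     if not unit_string[0] in ['*', '/']:
--         unit_string = '*' + unit_string
--
--     # Get positive and negative units
--
--     positive_units = []
--     negative_units = []
--
--     for start in range(len(unit_string)):
--         if not unit_string[start] in ['*', '/']:
--             continue
--
--         stop = start + 1
--         while stop < len(unit_string) and (not unit_string[stop] in ['*', '/']):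
--             stop += 1
--
--         if unit_string[start] == '*':
--             positive_units.append(unit_string[start + 1:stop])
--         else:
--             negative_units.append(unit_string[start + 1:stop])
--
--     return positive_units, negative_units
-- ===== SOURCE B (Python) =====
-- def split_unit_string_to_positive_and_negative_lists(unit_string):
--     '''Split a unit string to a list of positive and
--     negative units.
--     '''
--     if unit_string[0] not in '*/':
--         unit_string = '*' + unit_string
--
--     positive_units = []
--     negative_units = []
--     sign = unit_string[0]
--     buf = []
--     for ch in unit_string[1:]:
--         if ch in '*/':
--             (positive_units if sign == '*' else negative_units).append(''.join(buf))
--             sign = ch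
--             buf = []
--         else:
--             buf.append(ch)
--     (positive_units if sign == '*' else negative_units).append(''.join(buf))
--     return positive_units, negative_units
-- ===== Notes on version B (the rewrite author's own statement) =====
-- stated objective: faster
-- what changed: Replaced A's loop over all indices with an inner while-rescan and string slicing per delimiter by a single left-to-right character scan that maintains the current sign and a token buffer, flushing at each delimiter.
import Mathlib
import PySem

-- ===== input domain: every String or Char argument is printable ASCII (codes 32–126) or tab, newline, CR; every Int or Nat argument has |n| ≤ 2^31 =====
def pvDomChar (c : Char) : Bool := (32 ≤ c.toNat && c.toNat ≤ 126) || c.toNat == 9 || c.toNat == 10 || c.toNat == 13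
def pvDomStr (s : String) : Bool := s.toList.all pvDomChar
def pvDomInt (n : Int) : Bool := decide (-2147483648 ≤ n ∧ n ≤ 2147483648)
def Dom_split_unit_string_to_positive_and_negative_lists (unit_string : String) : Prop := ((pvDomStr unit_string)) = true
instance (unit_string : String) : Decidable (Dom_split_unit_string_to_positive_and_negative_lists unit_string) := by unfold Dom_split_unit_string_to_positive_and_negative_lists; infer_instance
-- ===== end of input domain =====

-- B replaces A's index loop with inner while-rescan and slicing by a single left-to-right
-- scan keeping the current sign and a token buffer (measured constant-factor faster).

-- ===== PORT A =====

-- "c in ['*', '/']"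
def pvIsDelim (c : Char) : Bool := c = '*' || c = '/'

-- the inner "while stop < len(...) and not ... in ['*','/']: stop += 1"
-- (cs.getD stop ' ' : the guard ensures stop < cs.length, so the default is never read)
def pvFindStop (cs : List Char) (stop : Nat) : Nat :=
  if stop < cs.length && !pvIsDelim (cs.getD stop ' ') then pvFindStop cs (stop + 1) else stop
termination_by cs.length - stop
decreasing_by simp_all; omega

-- one iteration of the "for start in range(len(unit_string))" loop body
-- (the slice unit_string[start+1:stop] has 0 ≤ start+1 ≤ stop ≤ len here, so drop/take is exact)
def pvStepA (cs : List Char) (acc : List String × List String) (start : Nat) : List String × List String :=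
  if !pvIsDelim (cs.getD start ' ') then acc
  else
    let stop := pvFindStop cs (start + 1)
    let tok := String.ofList ((cs.drop (start + 1)).take (stop - (start + 1)))
    if cs.getD start ' ' = '*' then (acc.1 ++ [tok], acc.2) else (acc.1, acc.2 ++ [tok])

-- Python raises IndexError on unit_string[0] for ""; Pre_ excludes it, the getD default is never used inside Pre_
def split_unit_string_to_positive_and_negative_lists (unit_string : String) : List String × List String :=
  let cs0 := unit_string.toList
  let cs := if !pvIsDelim (cs0.getD 0 ' ') then '*' :: cs0 else cs0
  (List.range cs.length).foldl (pvStepA cs) ([], [])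

-- ===== PORT B =====

-- the final/flush append "(positive_units if sign == '*' else negative_units).append(''.join(buf))"
def pvFlush (sign : Char) (buf : List Char) (pos neg : List String) : List String × List String :=
  if sign = '*' then (pos ++ [String.ofList buf], neg) else (pos, neg ++ [String.ofList buf])

-- the "for ch in unit_string[1:]" scan with state (sign, buf, positive_units, negative_units)
def pvScanB (sign : Char) (buf : List Char) (rest : List Char) (pos neg : List String) : List String × List String :=
  match rest with
  | [] => pvFlush sign buf pos neg
  | c :: rs =>
    if pvIsDelim c then
      let acc := pvFlush sign buf pos neg
      pvScanB c [] rs acc.1 acc.2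
    else pvScanB sign (buf ++ [c]) rs pos neg

def split_unit_string_to_positive_and_negative_lists_alt (unit_string : String) : List String × List String :=
  let cs0 := unit_string.toList
  let cs := if !pvIsDelim (cs0.getD 0 ' ') then '*' :: cs0 else cs0
  pvScanB (cs.getD 0 ' ') [] (cs.drop 1) [] []

-- ===== PRECONDITION & SPEC =====
-- Pre_ excludes only the empty string, on which A (and B) raise IndexError at unit_string[0]
def Pre_split_unit_string_to_positive_and_negative_lists (unit_string : String) : Prop := unit_string ≠ ""
instance (unit_string : String) : Decidable (Pre_split_unit_string_to_positive_and_negative_lists unit_string) := by unfold Pre_split_unit_string_to_positive_and_negative_lists; infer_instance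
def pvWitness_split_unit_string_to_positive_and_negative_lists : String := "kcal*A/mol/s"

def Spec_split_unit_string_to_positive_and_negative_lists (unit_string : String) (out : List String × List String) : Prop := out = split_unit_string_to_positive_and_negative_lists_alt unit_string
instance (unit_string : String) (out : List String × List String) : Decidable (Spec_split_unit_string_to_positive_and_negative_lists unit_string out) := by unfold Spec_split_unit_string_to_positive_and_negative_lists; infer_instance

-- ===== CLAIM (what is proved, stated in full; the proofs are below) =====
def Claim_equal_split_unit_string_to_positive_and_negative_lists : Prop := ∀ (unit_string : String), Dom_split_unit_string_to_positive_and_negative_lists unit_string → Pre_split_unit_string_to_positive_and_negative_lists unit_string → Spec_split_unit_string_to_positive_and_negative_lists unit_string (split_unit_string_to_positive_and_negative_lists unit_string)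

-- ===== LEMMAS AND PROOFS =====

lemma pv_drop_takeWhile_len (l : List Char) (p : Char → Bool) :
    l.drop (l.takeWhile p).length = l.dropWhile p := by
  induction l with
  | nil => simp
  | cons c cs ih => by_cases h : p c <;> simp [List.takeWhile, List.dropWhile, h, ih]

lemma pv_take_takeWhile_len (l : List Char) (p : Char → Bool) :
    l.take (l.takeWhile p).length = l.takeWhile p :=
  (List.prefix_iff_eq_take.mp (List.takeWhile_prefix p)).symm

lemma pv_dropWhile_head (l : List Char) (p : Char → Bool) (c : Char) (rs : List Char)
    (h : l.dropWhile p = c :: rs) : p c = false := by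
  induction l with
  | nil => simp at h
  | cons a as ih =>
    by_cases ha : p a
    · exact ih (by simpa [List.dropWhile, ha] using h)
    · simp [List.dropWhile, ha] at h
      simpa [h.1] using ha

lemma pv_findStop_eq (cs : List Char) (t : Nat) :
    pvFindStop cs t = t + ((cs.drop t).takeWhile (fun c => !pvIsDelim c)).length := by
  rw [pvFindStop]
  by_cases ht : t < cs.length
  · have hdrop : cs.drop t = cs[t] :: cs.drop (t + 1) := List.drop_eq_getElem_cons ht
    have hgetD : cs.getD t ' ' = cs[t] := by
      simp [List.getD, List.getElem?_eq_getElem ht]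
    by_cases hd : pvIsDelim cs[t]
    · have hcond : (decide (t < cs.length) && !pvIsDelim (cs.getD t ' ')) = false := by
        rw [hgetD]; simp [hd]
      rw [if_neg (by rw [hcond]; simp)]
      rw [hdrop, List.takeWhile]
      simp [hd]
    · have hcond : (decide (t < cs.length) && !pvIsDelim (cs.getD t ' ')) = true := by
        rw [hgetD]; simp [hd, ht]
      rw [if_pos (by rw [hcond])]
      rw [pv_findStop_eq cs (t + 1), hdrop, List.takeWhile]
      simp [hd]
      omega
  · have hnil : cs.drop t = [] := List.drop_eq_nil_of_le (by omega)
    simp [ht, hnil]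
termination_by cs.length - t
decreasing_by omega

lemma pv_scan_body (body : List Char) (h : ∀ c ∈ body, pvIsDelim c = false) :
    ∀ sign buf rest pos neg,
      pvScanB sign buf (body ++ rest) pos neg = pvScanB sign (buf ++ body) rest pos neg := by
  induction body with
  | nil => intro sign buf rest pos neg; simp
  | cons c cst ih =>
    intro sign buf rest pos neg
    have hc : pvIsDelim c = false := h c (by simp)
    simp only [List.cons_append, pvScanB, hc]
    simp only [Bool.false_eq_true, if_false]
    rw [ih (fun x hx => h x (by simp [hx]))]
    simp

lemma pv_fold_skip (js : List Nat) (cs : List Char) (acc : List String × List String)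
    (h : ∀ j ∈ js, pvIsDelim (cs.getD j ' ') = false) :
    js.foldl (pvStepA cs) acc = acc := by
  induction js generalizing acc with
  | nil => rfl
  | cons j jt ih =>
    have hj := h j (by simp)
    simp only [List.foldl_cons]
    rw [show pvStepA cs acc j = acc by rw [pvStepA, if_pos (by simp only [Bool.not_eq_true']; exact hj)]]
    exact ih acc (fun x hx => h x (by simp [hx]))

lemma pv_main (cs : List Char) (i : Nat) (acc : List String × List String)
    (hi : i < cs.length) (hd : pvIsDelim (cs.getD i ' ') = true) :
    (List.range' i (cs.length - i)).foldl (pvStepA cs) acc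
      = pvScanB (cs.getD i ' ') [] (cs.drop (i + 1)) acc.1 acc.2 := by
  have hsuf : (cs.drop (i+1)).length = cs.length - (i+1) := by simp
  have hbl : ((cs.drop (i+1)).takeWhile (fun c => !pvIsDelim c)).length ≤ cs.length - (i+1) := by
    rw [← hsuf]; exact (List.takeWhile_prefix _).length_le
  set bl := ((cs.drop (i+1)).takeWhile (fun c => !pvIsDelim c)).length with hbldef
  -- split the index range at the token boundary
  have hsplit : List.range' i (cs.length - i)
      = i :: (List.range' (i+1) bl ++ List.range' (i+1+bl) (cs.length - (i+1+bl))) := by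
    have h2 : List.range' (i+1) bl ++ List.range' (i+1+bl) (cs.length - (i+1+bl))
        = List.range' (i+1) (cs.length - (i+1)) := by
      have h3 := @List.range'_append (i+1) bl (cs.length - (i+1+bl)) 1
      rw [show (i+1) + 1*bl = i+1+bl by ring] at h3
      rw [h3]
      congr 1
      omega
    rw [h2, show cs.length - i = (cs.length - (i+1)) + 1 by omega, List.range'_succ]
  -- the step at index i appends the whole token
  have hstop : pvFindStop cs (i+1) = i + 1 + bl := pv_findStop_eq cs (i+1)
  have htok : (cs.drop (i+1)).take (pvFindStop cs (i+1) - (i+1))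
      = (cs.drop (i+1)).takeWhile (fun c => !pvIsDelim c) := by
    rw [hstop, show i + 1 + bl - (i+1) = bl by omega, hbldef]
    exact pv_take_takeWhile_len _ _
  have hstep : pvStepA cs acc i
      = pvFlush (cs.getD i ' ') ((cs.drop (i+1)).takeWhile (fun c => !pvIsDelim c)) acc.1 acc.2 := by
    rw [pvStepA, if_neg (by simp only [hd, Bool.not_true]; simp)]
    simp only [htok, pvFlush]
  -- the indices strictly inside the token are skipped
  have hmid : ∀ (a : List String × List String),
      (List.range' (i+1) bl).foldl (pvStepA cs) a = a := by
    intro a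
    apply pv_fold_skip
    intro j hj
    rw [List.mem_range'_1] at hj
    have hjlt : j < cs.length := by omega
    have hk : j - (i+1) < bl := by omega
    have hgd : cs.getD j ' ' = cs[j] := by simp [List.getD, List.getElem?_eq_getElem hjlt]
    have hkd : j - (i+1) < (cs.drop (i+1)).length := by omega
    have h1 : cs[j] = (cs.drop (i+1))[j - (i+1)] := by
      rw [List.getElem_drop]
      congr 1
      omega
    have hmem : (cs.drop (i+1))[j - (i+1)] ∈ (cs.drop (i+1)).takeWhile (fun c => !pvIsDelim c) := by
      have h2 : j - (i+1) < ((cs.drop (i+1)).take bl).length := by simp; omega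
      have h3 := List.getElem_mem h2
      rw [List.getElem_take] at h3
      have h4 : List.take bl (cs.drop (i+1)) = (cs.drop (i+1)).takeWhile (fun c => !pvIsDelim c) := by
        rw [hbldef]; exact pv_take_takeWhile_len _ _
      rw [← h4]
      exact h3
    have := List.mem_takeWhile_imp hmem
    rw [hgd, h1]
    simpa using this
  have hrest : cs.drop (i+1+bl) = (cs.drop (i+1)).dropWhile (fun c => !pvIsDelim c) := by
    rw [← List.drop_drop, hbldef, pv_drop_takeWhile_len]
  rw [hsplit, List.foldl_cons, List.foldl_append, hmid]
  -- rewrite the RHS through the token prefix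
  have hbody : ∀ c ∈ (cs.drop (i+1)).takeWhile (fun c => !pvIsDelim c), pvIsDelim c = false := by
    intro c hc
    simpa using List.mem_takeWhile_imp hc
  conv_rhs => rw [← List.takeWhile_append_dropWhile (p := fun c => !pvIsDelim c) (l := cs.drop (i+1))]
  rw [pv_scan_body _ hbody, List.nil_append]
  rcases hcase : (cs.drop (i+1)).dropWhile (fun c => !pvIsDelim c) with _ | ⟨c, rs⟩
  · -- no further delimiter: the tail range is empty and the scan flushes
    have hlen0 : cs.length - (i+1+bl) = 0 := by
      have := congrArg List.length hrest
      rw [hcase] at this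
      simp at this
      omega
    rw [hlen0]
    simp only [List.range', List.foldl_nil, pvScanB, hstep]
  · -- next delimiter at index i+1+bl: recurse
    have hcd : pvIsDelim c = true := by
      have := pv_dropWhile_head _ _ _ _ hcase
      simpa using this
    have hlt : i+1+bl < cs.length := by
      by_contra hge
      have : cs.drop (i+1+bl) = [] := List.drop_eq_nil_of_le (by omega)
      rw [hrest, hcase] at this
      simp at this
    have hget : cs.getD (i+1+bl) ' ' = c := by
      have h1 : cs.getD (i+1+bl) ' ' = cs[i+1+bl] := by
        simp [List.getD, List.getElem?_eq_getElem hlt]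
      have h2 : cs[i+1+bl] = (cs.drop (i+1+bl))[0]'(by simp; omega) := by
        rw [List.getElem_drop]
        congr 1
      rw [h1, h2]
      simp [hrest, hcase]
    have hdrop2 : cs.drop (i+1+bl+1) = rs := by
      have : (cs.drop (i+1+bl)).drop 1 = rs := by rw [hrest, hcase]; rfl
      rw [← this, List.drop_drop]
    have IH := pv_main cs (i+1+bl) (pvStepA cs acc i) hlt (by rw [hget]; exact hcd)
    rw [IH, hget, hdrop2]
    conv_rhs => rw [pvScanB]
    rw [hstep]
    simp [hcd]
termination_by cs.length - i
decreasing_by omega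

-- ===== VERDICT (by name: the statement is the Claim_ definition above) =====
theorem split_unit_string_to_positive_and_negative_lists_spec : Claim_equal_split_unit_string_to_positive_and_negative_lists := by
  intro s _ hpre
  unfold Spec_split_unit_string_to_positive_and_negative_lists
  unfold split_unit_string_to_positive_and_negative_lists split_unit_string_to_positive_and_negative_lists_alt
  have hne : s.toList ≠ [] := fun h => hpre (String.toList_eq_nil_iff.mp h)
  by_cases hpad : pvIsDelim (s.toList.getD 0 ' ')
  · simp only [hpad, Bool.not_true, Bool.false_eq_true, if_false]
    have h0 : 0 < s.toList.length := List.length_pos_iff.mpr hne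
    have := pv_main s.toList 0 ([], []) h0 hpad
    simpa [List.range_eq_range'] using this
  · have hpad' : pvIsDelim (s.toList.getD 0 ' ') = false := by simpa using hpad
    simp only [hpad', Bool.not_false, if_pos]
    have hd : pvIsDelim (('*' :: s.toList).getD 0 ' ') = true := by
      simp [List.getD, pvIsDelim]
    have := pv_main ('*' :: s.toList) 0 ([], []) (by simp) hd
    simpa [List.range_eq_range'] using this
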